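-- pv_equiv track=rewrite | github.com/m1sterzer0/codejams | python/2018/1A/C.py | intervalSearch
-- ===== SOURCE A (Python) =====
-- def intervalSearch(intervals,p,minperim) :
--     targetAdder = p - minperim
--     l = [ intervals[0] ]
--     if checkIntervals(l,targetAdder) : return p
--     for i in intervals[1:] :
--         l = mergeInterval(l,i)
--         if checkIntervals(l,targetAdder) : return p
--         l = [x for x in l if x[0] < targetAdder]
--     return minperim + l[-1][1]
--
-- def checkIntervals(l,t) :
--     for (ll,rr) in l :
--         if ll <= t and t <= rr : return True
--     return False
--
-- def mergeInterval(l,i) :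
--     l1,r1 = i
--     l2 = l + [i] + [(l1+x,r1+y) for x,y in l]
--     l2.sort()
--     l3 = []
--     ll,rr = l2[0]
--     for x,y in l2[1:] :
--         if x > rr : l3.append( (ll,rr) ); ll,rr = x,y
--         else: rr = max(y,rr)
--     l3.append( (ll,rr) )
--     return l3
-- ===== SOURCE B (Python) =====
-- def _merge2(xs, ys):
--     out = []
--     i = j = 0
--     while i < len(xs) and j < len(ys):
--         if xs[i] <= ys[j]:
--             out.append(xs[i]); i += 1
--         else:
--             out.append(ys[j]); j += 1
--     out.extend(xs[i:])
--     out.extend(ys[j:])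
--     return out
--
-- def mergeInterval(l, i):
--     l1, r1 = i
--     # l and the shifted copy are already sorted: merge the three sorted runs
--     # instead of sorting, then collapse overlaps onto the tail of `out`.
--     merged = _merge2(_merge2(l, [i]), [(l1 + x, r1 + y) for x, y in l])
--     out = []
--     for iv in merged:
--         if out and iv[0] <= out[-1][1]:
--             if out[-1][1] < iv[1]:
--                 out[-1] = (out[-1][0], iv[1])
--         else:
--             out.append(iv)
--     return out
--
-- def checkIntervals(l, t):
--     return any(ll <= t <= rr for ll, rr in l)
--
-- def intervalSearch(intervals, p, minperim):
--     targetAdder = p - minperim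
--     l = [intervals[0]]
--     if checkIntervals(l, targetAdder):
--         return p
--     for i in intervals[1:]:
--         l = mergeInterval(l, i)
--         if checkIntervals(l, targetAdder):
--             return p
--         l = [x for x in l if x[0] < targetAdder]
--     return minperim + l[-1][1]
-- ===== Notes on version B (the rewrite author's own statement) =====
-- stated objective: alternative
-- what changed: mergeInterval no longer builds a list and sorts it: it merges the three already-sorted runs (current list, new interval, shifted copy) with a two-pointer merge and collapses overlaps onto the tail of the output list instead of A's (ll,rr)-register sweep; B raises exactly where A raises, and Pre_ excludes exactly those IndexError inputs.
import Mathlib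
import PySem

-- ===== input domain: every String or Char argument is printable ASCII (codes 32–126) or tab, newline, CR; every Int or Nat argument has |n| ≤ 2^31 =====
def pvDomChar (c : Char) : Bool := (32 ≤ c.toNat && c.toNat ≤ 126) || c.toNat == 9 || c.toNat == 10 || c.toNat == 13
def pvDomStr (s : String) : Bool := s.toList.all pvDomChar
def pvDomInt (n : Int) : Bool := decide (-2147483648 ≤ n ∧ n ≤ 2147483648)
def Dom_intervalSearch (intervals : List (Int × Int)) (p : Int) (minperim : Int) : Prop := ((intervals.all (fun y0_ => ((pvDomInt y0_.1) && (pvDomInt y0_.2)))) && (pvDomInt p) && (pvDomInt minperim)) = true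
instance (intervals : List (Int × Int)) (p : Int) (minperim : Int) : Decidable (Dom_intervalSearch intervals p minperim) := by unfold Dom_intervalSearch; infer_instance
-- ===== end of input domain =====

-- B replaces A's sort-then-sweep merge by an O(n) merge of the three already-sorted
-- runs followed by a collapse onto the tail of the output list (objective: alternative).

-- ===== PORT A =====
-- checkIntervals: loop with early `return True` = any
def pvCheckA (l : List (Int × Int)) (t : Int) : Bool :=
  l.any (fun x => decide (x.1 ≤ t) && decide (t ≤ x.2))

-- mergeInterval: build l2, l2.sort(), then the (ll,rr)-register sweep appending to l3
def pvMergeA (l : List (Int × Int)) (i : Int × Int) : List (Int × Int) :=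
  match PySem.List.sorted2 (l ++ [i] ++ l.map (fun xy => (i.1 + xy.1, i.2 + xy.2)))
      Prod.fst Prod.snd with
  | [] => []  -- unreachable: l2 contains i, Python reads l2[0]
  | h :: rest =>
    let st := rest.foldl
      (fun (s : (Int × Int) × List (Int × Int)) xy =>
        if s.1.2 < xy.1 then (xy, s.2 ++ [s.1])
        else ((s.1.1, max xy.2 s.1.2), s.2)) (h, [])
    st.2 ++ [st.1]

-- the `for i in intervals[1:]` loop with its early returns
def pvLoopA (p minperim t : Int) : List (Int × Int) → List (Int × Int) → Int
  | l, [] => minperim + (PySem.List.pyGetD l (-1) (0, 0)).2  -- l = [] raises in Python: outside Pre_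
  | l, i :: rs =>
      let l' := pvMergeA l i
      if pvCheckA l' t then p
      else pvLoopA p minperim t (l'.filter (fun x => decide (x.1 < t))) rs

def intervalSearch (intervals : List (Int × Int)) (p : Int) (minperim : Int) : Int :=
  let t := p - minperim
  match intervals with
  | [] => 0  -- unreachable under Pre_: Python raises IndexError on intervals[0]
  | i0 :: rest =>
      if pvCheckA [i0] t then p else pvLoopA p minperim t [i0] rest

-- ===== PORT B =====
-- python tuple comparison xs[i] <= ys[j]
def pvLexLEb (a b : Int × Int) : Bool :=
  decide (a.1 < b.1) || (decide (a.1 = b.1) && decide (a.2 ≤ b.2))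

-- _merge2: two-pointer merge of two sorted runs
def pvMerge2 : List (Int × Int) → List (Int × Int) → List (Int × Int)
  | [], ys => ys
  | x :: xs, [] => x :: xs
  | x :: xs, y :: ys =>
      if pvLexLEb x y then x :: pvMerge2 xs (y :: ys)
      else y :: pvMerge2 (x :: xs) ys
termination_by xs ys => xs.length + ys.length

-- body of B's collapse loop: extend out[-1] in place or append
def pvStepB (out : List (Int × Int)) (iv : Int × Int) : List (Int × Int) :=
  match out.getLast? with
  | some lst =>
      if iv.1 ≤ lst.2 then
        (if lst.2 < iv.2 then out.dropLast ++ [(lst.1, iv.2)] else out)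
      else out ++ [iv]
  | none => out ++ [iv]

def pvMergeB (l : List (Int × Int)) (i : Int × Int) : List (Int × Int) :=
  let merged := pvMerge2 (pvMerge2 l [i]) (l.map (fun xy => (i.1 + xy.1, i.2 + xy.2)))
  merged.foldl pvStepB []

def pvCheckB (l : List (Int × Int)) (t : Int) : Bool :=
  l.any (fun x => decide (x.1 ≤ t) && decide (t ≤ x.2))

def pvLoopB (p minperim t : Int) : List (Int × Int) → List (Int × Int) → Int
  | l, [] => minperim + (PySem.List.pyGetD l (-1) (0, 0)).2  -- l = [] raises in Python: outside Pre_
  | l, i :: rs =>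
      let l' := pvMergeB l i
      if pvCheckB l' t then p
      else pvLoopB p minperim t (l'.filter (fun x => decide (x.1 < t))) rs

def intervalSearch_alt (intervals : List (Int × Int)) (p : Int) (minperim : Int) : Int :=
  let t := p - minperim
  match intervals with
  | [] => 0
  | i0 :: rest =>
      if pvCheckB [i0] t then p else pvLoopB p minperim t [i0] rest

-- ===== PRECONDITION & SPEC =====
-- canonical overlap-collapse of a sorted interval list (used by Pre_ and by the proofs)
def pvCollapseR : List (Int × Int) → List (Int × Int)
  | [] => []
  | [a] => [a]
  | a :: b :: rest =>
      if a.2 < b.1 then a :: pvCollapseR (b :: rest)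
      else pvCollapseR ((a.1, max b.2 a.2) :: rest)
termination_by l => l.length

-- one merge step of the reachable-interval list, stated canonically (sort + collapse)
def pvPreMerge (l : List (Int × Int)) (i : Int × Int) : List (Int × Int) :=
  pvCollapseR ((l ++ [i] ++ l.map (fun xy => (i.1 + xy.1, i.2 + xy.2))).mergeSort pvLexLEb)

-- does the run over the remaining intervals end normally (target covered, or final list nonempty)?
def pvPreRun (t : Int) : List (Int × Int) → List (Int × Int) → Bool
  | l, [] => decide (l ≠ [])
  | l, i :: rs =>
      let l' := pvPreMerge l i
      if l'.any (fun x => decide (x.1 ≤ t) && decide (t ≤ x.2)) then true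
      else pvPreRun t (l'.filter (fun x => decide (x.1 < t))) rs

-- Pre_ excludes EXACTLY the inputs on which Python A raises IndexError (B raises there too):
-- the empty list (intervals[0]), and runs in which the pruned reachable-interval list is empty
-- at the final `l[-1]` without p−minperim ever being covered.  Whether that happens is a
-- property of the whole run, so Pre_ states it with pvPreRun, a spec-level replay of the sweep
-- (independent of both ports); the equality proof below does not depend on this hypothesis —
-- the two ports agree on every input, Pre_ only delimits where they model the Python programs.
def Pre_intervalSearch (intervals : List (Int × Int)) (p : Int) (minperim : Int) : Prop :=
  intervals ≠ [] ∧
    (((intervals.headD (0, 0)).1 ≤ p - minperim ∧ p - minperim ≤ (intervals.headD (0, 0)).2) ∨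
      pvPreRun (p - minperim) [intervals.headD (0, 0)] intervals.tail = true)
instance (intervals : List (Int × Int)) (p : Int) (minperim : Int) : Decidable (Pre_intervalSearch intervals p minperim) := by unfold Pre_intervalSearch; infer_instance

def pvWitness_intervalSearch : (List (Int × Int)) × Int × Int := ([(0, 5)], 10, 8)

def Spec_intervalSearch (intervals : List (Int × Int)) (p : Int) (minperim : Int) (out : Int) : Prop := out = intervalSearch_alt intervals p minperim
instance (intervals : List (Int × Int)) (p : Int) (minperim : Int) (out : Int) : Decidable (Spec_intervalSearch intervals p minperim out) := by unfold Spec_intervalSearch; infer_instance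

-- ===== CLAIM (what is proved, stated in full; the proofs are below) =====
def Claim_equal_intervalSearch : Prop := ∀ (intervals : List (Int × Int)) (p : Int) (minperim : Int), Dom_intervalSearch intervals p minperim → Pre_intervalSearch intervals p minperim → Spec_intervalSearch intervals p minperim (intervalSearch intervals p minperim)

-- ===== LEMMAS AND PROOFS =====

-- lexicographic order on int pairs (Python's tuple order)
def pvLexLE (a b : Int × Int) : Prop := a.1 < b.1 ∨ (a.1 = b.1 ∧ a.2 ≤ b.2)

lemma pvLexLEb_iff (a b : Int × Int) : pvLexLEb a b = true ↔ pvLexLE a b := by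
  simp [pvLexLEb, pvLexLE]

lemma pvLex_trans {a b c : Int × Int} (h1 : pvLexLE a b) (h2 : pvLexLE b c) : pvLexLE a c := by
  unfold pvLexLE at *; omega

lemma pvLex_of_not {a b : Int × Int} (h : ¬ pvLexLE a b) : pvLexLE b a := by
  unfold pvLexLE at *; omega

lemma pvLex_antisymm {a b : Int × Int} (h1 : pvLexLE a b) (h2 : pvLexLE b a) : a = b := by
  unfold pvLexLE at *
  have h3 : a.1 = b.1 ∧ a.2 = b.2 := by omega
  exact Prod.ext h3.1 h3.2

lemma pvSweepA_eq (rest : List (Int × Int)) (h : Int × Int) (acc : List (Int × Int)) :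
    (rest.foldl (fun (s : (Int × Int) × List (Int × Int)) xy =>
        if s.1.2 < xy.1 then (xy, s.2 ++ [s.1])
        else ((s.1.1, max xy.2 s.1.2), s.2)) (h, acc)).2
      ++ [(rest.foldl (fun (s : (Int × Int) × List (Int × Int)) xy =>
        if s.1.2 < xy.1 then (xy, s.2 ++ [s.1])
        else ((s.1.1, max xy.2 s.1.2), s.2)) (h, acc)).1]
      = acc ++ pvCollapseR (h :: rest) := by
  induction rest generalizing h acc with
  | nil => simp [pvCollapseR]
  | cons b rs ih =>
      by_cases hc : h.2 < b.1
      · simp only [List.foldl_cons, if_pos hc]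
        rw [ih b (acc ++ [h])]
        simp [pvCollapseR, if_pos hc]
      · simp only [List.foldl_cons, if_neg hc]
        rw [ih (h.1, max b.2 h.2) acc]
        simp [pvCollapseR, if_neg hc]

lemma pvFoldB_inv (ms : List (Int × Int)) (acc : List (Int × Int)) (c : Int × Int) :
    ms.foldl pvStepB (acc ++ [c]) = acc ++ pvCollapseR (c :: ms) := by
  induction ms generalizing acc c with
  | nil => simp [pvCollapseR]
  | cons iv ms ih =>
      simp only [List.foldl_cons]
      by_cases h1 : iv.1 ≤ c.2
      · by_cases h2 : c.2 < iv.2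
        · have hs : pvStepB (acc ++ [c]) iv = acc ++ [(c.1, iv.2)] := by
            simp [pvStepB, if_pos h1, if_pos h2]
          rw [hs, ih acc (c.1, iv.2)]
          have hm : max iv.2 c.2 = iv.2 := by omega
          simp [pvCollapseR, show ¬ c.2 < iv.1 by omega, hm]
        · have hs : pvStepB (acc ++ [c]) iv = acc ++ [c] := by
            simp [pvStepB, if_pos h1, if_neg h2]
          rw [hs, ih acc c]
          have hm : max iv.2 c.2 = c.2 := by omega
          simp [pvCollapseR, show ¬ c.2 < iv.1 by omega, hm]
      · have hs : pvStepB (acc ++ [c]) iv = (acc ++ [c]) ++ [iv] := by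
          simp [pvStepB, if_neg h1]
        rw [hs, ih (acc ++ [c]) iv]
        simp [pvCollapseR, show c.2 < iv.1 by omega]

lemma pvCollapseB_eq (ms : List (Int × Int)) : ms.foldl pvStepB [] = pvCollapseR ms := by
  cases ms with
  | nil => simp [pvCollapseR]
  | cons c rest =>
      have hs : pvStepB [] c = [] ++ [c] := by simp [pvStepB]
      simp only [List.foldl_cons, hs]
      rw [pvFoldB_inv rest [] c]
      simp

lemma pvCollapseR_mem (xs : List (Int × Int)) :
    ∀ c ∈ pvCollapseR xs, ∃ e ∈ xs, e.1 = c.1 ∧ e.2 ≤ c.2 := by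
  fun_induction pvCollapseR xs with
  | case1 => simp
  | case2 a => intro c hc; simp at hc; exact ⟨a, by simp [hc]⟩
  | case3 a b rest hab ih =>
      intro c hc
      rcases List.mem_cons.mp hc with rfl | hc'
      · exact ⟨c, by simp⟩
      · obtain ⟨e, he, h1, h2⟩ := ih c hc'
        exact ⟨e, by simp at he ⊢; tauto, h1, h2⟩
  | case4 a b rest hab ih =>
      intro c hc
      obtain ⟨e, he, h1, h2⟩ := ih c hc
      rcases List.mem_cons.mp he with rfl | he'
      · exact ⟨a, by simp, by simpa using h1, by simp at h2; omega⟩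
      · exact ⟨e, by simp [he'], h1, h2⟩

lemma pvCollapseR_pairwise (xs : List (Int × Int)) (hp : xs.Pairwise pvLexLE) :
    (pvCollapseR xs).Pairwise pvLexLE := by
  fun_induction pvCollapseR xs with
  | case1 => simp
  | case2 a => simp
  | case3 a b rest hab ih =>
      rw [List.pairwise_cons] at hp
      refine List.pairwise_cons.mpr ⟨?_, ih hp.2⟩
      intro c hc
      obtain ⟨e, he, h1, h2⟩ := pvCollapseR_mem _ c hc
      have hae : pvLexLE a e := hp.1 e he
      unfold pvLexLE at *; omega
  | case4 a b rest hab ih =>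
      apply ih
      rw [List.pairwise_cons] at hp
      rw [List.pairwise_cons] at hp ⊢
      constructor
      · intro c hc
        have hac : pvLexLE a c := hp.1 c (by simp [hc])
        have hbc : pvLexLE b c := hp.2.1 c hc
        have hab' : pvLexLE a b := hp.1 b (by simp)
        unfold pvLexLE at *; simp at *; omega
      · exact hp.2.2

lemma pvMerge2_perm (xs ys : List (Int × Int)) : (pvMerge2 xs ys).Perm (xs ++ ys) := by
  fun_induction pvMerge2 xs ys with
  | case1 ys => simp
  | case2 x xs => simp
  | case3 x xs y ys hxy ih =>
      simpa using ih.cons x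
  | case4 x xs y ys hxy ih =>
      refine (ih.cons y).trans ?_
      exact (List.perm_middle).symm

lemma pvMerge2_pairwise (xs ys : List (Int × Int)) (hx : xs.Pairwise pvLexLE)
    (hy : ys.Pairwise pvLexLE) : (pvMerge2 xs ys).Pairwise pvLexLE := by
  fun_induction pvMerge2 xs ys with
  | case1 ys => simpa [pvMerge2] using hy
  | case2 x xs => simpa [pvMerge2] using hx
  | case3 x xs y ys hxy ih =>
      rw [List.pairwise_cons] at hx
      refine List.pairwise_cons.mpr ⟨?_, ih hx.2 hy⟩
      intro c hc
      have hc' := (pvMerge2_perm xs (y :: ys)).mem_iff.mp hc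
      have hxy' : pvLexLE x y := (pvLexLEb_iff x y).mp hxy
      rcases List.mem_append.mp hc' with h | h
      · exact hx.1 c h
      · rcases List.mem_cons.mp h with rfl | h'
        · exact hxy'
        · exact pvLex_trans hxy' ((List.pairwise_cons.mp hy).1 c h')
  | case4 x xs y ys hxy ih =>
      rw [List.pairwise_cons] at hy
      refine List.pairwise_cons.mpr ⟨?_, ih hx hy.2⟩
      intro c hc
      have hc' := (pvMerge2_perm (x :: xs) ys).mem_iff.mp hc
      have hyx : pvLexLE y x := by
        apply pvLex_of_not; intro h; exact absurd ((pvLexLEb_iff x y).mpr h) (by simpa using hxy)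
      rcases List.mem_append.mp hc' with h | h
      · rcases List.mem_cons.mp h with rfl | h'
        · exact hyx
        · exact pvLex_trans hyx ((List.pairwise_cons.mp hx).1 c h')
      · exact hy.1 c h

lemma pvShift_pairwise (l : List (Int × Int)) (dx dy : Int) (hl : l.Pairwise pvLexLE) :
    (l.map (fun xy => (dx + xy.1, dy + xy.2))).Pairwise pvLexLE := by
  rw [List.pairwise_map]
  exact hl.imp (by intro a b hab; unfold pvLexLE at *; simp at *; omega)

-- the comparison sorted2 uses (strict lexicographic <)
def pvBfr (a b : Int × Int) : Bool :=
  decide (a.1 < b.1) || (!decide (b.1 < a.1) && decide (a.2 < b.2))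

lemma pvInsertBy_pairwise (x : Int × Int) (ys : List (Int × Int))
    (hp : ys.Pairwise pvLexLE) : (PySem.List.insertBy pvBfr x ys).Pairwise pvLexLE := by
  induction ys with
  | nil => simp [PySem.List.insertBy]
  | cons y ys ih =>
      by_cases hb : pvBfr x y = true
      · rw [PySem.List.insertBy, if_pos hb]
        have hxy : pvLexLE x y := by simp [pvBfr] at hb; unfold pvLexLE; omega
        refine List.pairwise_cons.mpr ⟨?_, hp⟩
        intro c hc
        rcases List.mem_cons.mp hc with rfl | h'
        · exact hxy
        · exact pvLex_trans hxy ((List.pairwise_cons.mp hp).1 c h')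
      · rw [PySem.List.insertBy, if_neg hb]
        rw [List.pairwise_cons] at hp
        refine List.pairwise_cons.mpr ⟨?_, ih hp.2⟩
        intro c hc
        rcases (PySem.List.mem_insertBy pvBfr x c ys).mp hc with rfl | h'
        · simp [pvBfr] at hb; unfold pvLexLE; omega
        · exact hp.1 c h'

lemma pvSorted2_eq_foldl (xs : List (Int × Int)) :
    PySem.List.sorted2 xs Prod.fst Prod.snd
      = xs.foldl (fun acc x => PySem.List.insertBy pvBfr x acc) [] := rfl

lemma pvSorted2_pairwise (xs : List (Int × Int)) :
    (PySem.List.sorted2 xs Prod.fst Prod.snd).Pairwise pvLexLE := by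
  rw [pvSorted2_eq_foldl]
  have aux : ∀ (l : List (Int × Int)) (acc : List (Int × Int)), acc.Pairwise pvLexLE →
      (l.foldl (fun acc x => PySem.List.insertBy pvBfr x acc) acc).Pairwise pvLexLE := by
    intro l
    induction l with
    | nil => intro acc h; simpa using h
    | cons x l ih =>
        intro acc h
        exact ih _ (pvInsertBy_pairwise x acc h)
  exact aux xs [] (by simp)

lemma pvSorted2_canon (xs ys : List (Int × Int)) (hperm : ys.Perm xs)
    (hp : ys.Pairwise pvLexLE) : PySem.List.sorted2 xs Prod.fst Prod.snd = ys := by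
  apply List.Perm.eq_of_pairwise (le := pvLexLE)
  · intro a b _ _ h1 h2; exact pvLex_antisymm h1 h2
  · exact pvSorted2_pairwise xs
  · exact hp
  · exact (PySem.List.sorted2_perm xs Prod.fst Prod.snd false).trans hperm.symm

lemma pvMergeA_collapse (l : List (Int × Int)) (i : Int × Int) :
    pvMergeA l i = pvCollapseR (PySem.List.sorted2
      (l ++ [i] ++ l.map (fun xy => (i.1 + xy.1, i.2 + xy.2))) Prod.fst Prod.snd) := by
  unfold pvMergeA
  generalize PySem.List.sorted2
      (l ++ [i] ++ l.map (fun xy => (i.1 + xy.1, i.2 + xy.2))) Prod.fst Prod.snd = s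
  cases s with
  | nil => simp [pvCollapseR]
  | cons h rest => simpa using pvSweepA_eq rest h []

lemma pvMergeB_collapse (l : List (Int × Int)) (i : Int × Int) :
    pvMergeB l i = pvCollapseR
      (pvMerge2 (pvMerge2 l [i]) (l.map (fun xy => (i.1 + xy.1, i.2 + xy.2)))) := by
  unfold pvMergeB
  exact pvCollapseB_eq _

lemma pvMergeA_eq_pvMergeB (l : List (Int × Int)) (i : Int × Int)
    (hl : l.Pairwise pvLexLE) : pvMergeA l i = pvMergeB l i := by
  have hpair : (pvMerge2 (pvMerge2 l [i]) (l.map (fun xy => (i.1 + xy.1, i.2 + xy.2)))).Pairwise pvLexLE :=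
    pvMerge2_pairwise _ _ (pvMerge2_pairwise _ _ hl (by simp)) (pvShift_pairwise l i.1 i.2 hl)
  have hperm : (pvMerge2 (pvMerge2 l [i]) (l.map (fun xy => (i.1 + xy.1, i.2 + xy.2)))).Perm
      (l ++ [i] ++ l.map (fun xy => (i.1 + xy.1, i.2 + xy.2))) := by
    refine (pvMerge2_perm _ _).trans ?_
    exact (pvMerge2_perm l [i]).append_right _
  have hs := pvSorted2_canon _ _ hperm hpair
  rw [pvMergeA_collapse, pvMergeB_collapse, hs]

lemma pvMergeB_pairwise (l : List (Int × Int)) (i : Int × Int)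
    (hl : l.Pairwise pvLexLE) : (pvMergeB l i).Pairwise pvLexLE := by
  unfold pvMergeB
  simp only []
  rw [pvCollapseB_eq]
  exact pvCollapseR_pairwise _
    (pvMerge2_pairwise _ _ (pvMerge2_pairwise _ _ hl (by simp)) (pvShift_pairwise l i.1 i.2 hl))

lemma pvLoop_eq (p minperim t : Int) (rest : List (Int × Int)) :
    ∀ l : List (Int × Int), l.Pairwise pvLexLE →
      pvLoopA p minperim t l rest = pvLoopB p minperim t l rest := by
  induction rest with
  | nil => intro l _; simp [pvLoopA, pvLoopB]
  | cons i rs ih =>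
      intro l hl
      simp only [pvLoopA, pvLoopB]
      rw [pvMergeA_eq_pvMergeB l i hl]
      have hck : pvCheckA = pvCheckB := rfl
      rw [hck]
      by_cases hc : pvCheckB (pvMergeB l i) t = true
      · simp [hc]
      · simp only [hc, if_neg, Bool.false_eq_true, not_false_eq_true]
        exact ih _ ((pvMergeB_pairwise l i hl).filter _)

-- ===== VERDICT (by name: the statement is the Claim_ definition above) =====
theorem intervalSearch_spec : Claim_equal_intervalSearch := by
  intro intervals p minperim _ _
  unfold Spec_intervalSearch intervalSearch intervalSearch_alt
  cases intervals with
  | nil => rfl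
  | cons i0 rest =>
      simp only []
      have hck : pvCheckA = pvCheckB := rfl
      rw [hck]
      by_cases hc : pvCheckB [i0] (p - minperim) = true
      · simp [hc]
      · simp only [hc, Bool.false_eq_true, if_false]
        exact pvLoop_eq p minperim (p - minperim) rest [i0] (by simp)
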